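-- pv_equiv track=rewrite | github.com/tommyod/PythonAlgorithms | algorithms/sequences.py | fibonacci_order_n
-- ===== SOURCE A (Python) =====
-- import collections
--
-- def fibonacci_order_n(n, terms=5):
--     """
--     Yields the first t terms in the generalized Fibonacci numbers of order n.
--
--     We define the generalized Fibonacci numbers of order n by the recursion:
--     F(0 ... n) = 1
--     F(i) = F(i - 1) + F(i - 2) + F(i - n)
--
--     Algorithmic details
--     -------------------
--     Memory: O(t)
--     Time: O(nt)
--     where n is the order and t is the number of terms.
--
--     Examples
--     --------
--     >>> list(fibonacci_order_n(2, terms = 8))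
--     [1, 1, 2, 3, 5, 8, 13, 21]
--
--     >>> list(fibonacci_order_n(4, terms = 10))
--     [1, 1, 1, 1, 4, 7, 13, 25, 49, 94]
--
--     References
--     ----------
--     [1] ...
--     """
--
--     # Initialize a partial sequence, i.e. variables to keep track of.
--     # Since F(i) = F(i - 1) + F(i - 2) + F(i - n), we only keep n variables.
--     partial_sequence = collections.deque([1] * n)
--
--     # Yield the variables in the partial sequence
--     for i, value in enumerate(partial_sequence, start=1):
--         if i > terms:
--             return
--         yield value
--
--     # Start yielding, summing and exchanging in a queue-structure
--     while True:
--         i += 1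
--         next_value = sum(partial_sequence)
--
--         # Add a break criterion to help the user, making it harder to
--         # generate an infinite stream of elements
--         if i > terms:
--             return
--
--         yield next_value
--         partial_sequence.popleft()
--         partial_sequence.append(next_value)
-- ===== SOURCE B (Python) =====
-- def fibonacci_order_n(n, terms=5):
--     out = [1] * min(n, terms)
--     s = n  # running sum of the current window of the last n terms
--     for i in range(n, terms):
--         out.append(s)
--         s += s - out[i - n]  # add the new term, drop the one leaving the window
--     return out
-- ===== Notes on version B (the rewrite author's own statement) =====
-- stated objective: alternative
-- what changed: B keeps an incrementally maintained running window sum (add the new term, subtract the element leaving the window, looked up in the output list) instead of re-summing an n-element deque at every step, and builds the result list directly instead of A's two-phase generator with a deque.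
import Mathlib
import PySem

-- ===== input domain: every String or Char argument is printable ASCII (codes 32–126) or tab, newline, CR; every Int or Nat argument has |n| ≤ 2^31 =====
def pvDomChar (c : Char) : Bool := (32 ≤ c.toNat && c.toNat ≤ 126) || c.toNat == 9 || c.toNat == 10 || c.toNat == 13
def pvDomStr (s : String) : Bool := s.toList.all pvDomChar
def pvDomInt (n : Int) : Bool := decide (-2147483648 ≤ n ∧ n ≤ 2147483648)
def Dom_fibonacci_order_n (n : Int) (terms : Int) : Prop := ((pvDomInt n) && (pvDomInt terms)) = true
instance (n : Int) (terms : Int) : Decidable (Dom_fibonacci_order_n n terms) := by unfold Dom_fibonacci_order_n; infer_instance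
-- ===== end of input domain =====

-- B maintains the window sum incrementally (add the new term, subtract the one that
-- leaves the window) instead of re-summing the n-element deque at every step.
-- A is a generator; the ports return the list of all yielded values.

-- ===== PORT A =====

-- the 'for i, value in enumerate(partial_sequence, start=1)' phase:
-- returns (yielded values, final value of i, whether the generator returned early)
def fibA_for : List Int → Int → Int → (List Int × Int × Bool)
  | [], i, _terms => ([], i, false)
  | v :: rest, i, terms =>
      if i + 1 > terms then ([], i + 1, true)
      else (v :: (fibA_for rest (i + 1) terms).1,
            (fibA_for rest (i + 1) terms).2.1, (fibA_for rest (i + 1) terms).2.2)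

-- the 'while True' phase: i += 1; next_value = sum(deque); return if i > terms;
-- yield next_value; popleft(); append(next_value)
def fibA_while (seq : List Int) (i : Int) (terms : Int) : List Int :=
  if i + 1 > terms then []
  else seq.sum :: fibA_while (seq.tail ++ [seq.sum]) (i + 1) terms
termination_by (terms - i).toNat
decreasing_by simp_wf; omega

def fibonacci_order_n (n : Int) (terms : Int) : List Int :=
  -- partial_sequence = deque([1] * n)
  if (fibA_for (List.replicate n.toNat 1) 0 terms).2.2
  then (fibA_for (List.replicate n.toNat 1) 0 terms).1
  else (fibA_for (List.replicate n.toNat 1) 0 terms).1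
        ++ fibA_while (List.replicate n.toNat 1)
             (fibA_for (List.replicate n.toNat 1) 0 terms).2.1 terms

-- ===== PORT B =====

-- 'for i in range(n, terms): out.append(s); s += s - out[i - n]'
def fibB_loop (out : List Int) (s : Int) (i : Int) (terms : Int) (n : Int) : List Int :=
  if terms ≤ i then out
  else fibB_loop (out ++ [s]) (s + (s - PySem.List.pyGetD (out ++ [s]) (i - n) 0))
         (i + 1) terms n
termination_by (terms - i).toNat
decreasing_by simp_wf; omega

def fibonacci_order_n_alt (n : Int) (terms : Int) : List Int :=
  fibB_loop (List.replicate (min n terms).toNat 1) n n terms n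

-- ===== PRECONDITION & SPEC =====
-- Pre_ excludes exactly n ≤ 0, on which the Python A raises UnboundLocalError
-- ('i' is never bound because the deque [1]*n is empty).
def Pre_fibonacci_order_n (n : Int) (terms : Int) : Prop := 1 ≤ n
instance (n : Int) (terms : Int) : Decidable (Pre_fibonacci_order_n n terms) := by unfold Pre_fibonacci_order_n; infer_instance
def pvWitness_fibonacci_order_n : Int × Int := (3, 10)

def Spec_fibonacci_order_n (n : Int) (terms : Int) (out : List Int) : Prop := out = fibonacci_order_n_alt n terms
instance (n : Int) (terms : Int) (out : List Int) : Decidable (Spec_fibonacci_order_n n terms out) := by unfold Spec_fibonacci_order_n; infer_instance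

-- ===== CLAIM (what is proved, stated in full; the proofs are below) =====
def Claim_equal_fibonacci_order_n : Prop := ∀ (n : Int) (terms : Int), Dom_fibonacci_order_n n terms → Pre_fibonacci_order_n n terms → Spec_fibonacci_order_n n terms (fibonacci_order_n n terms)

-- ===== LEMMAS AND PROOFS =====

lemma fibA_for_spec (l : List Int) (i terms : Int) :
    fibA_for l i terms =
      if (l.length : Int) ≤ terms - i ∨ l = [] then (l, i + l.length, false)
      else ((l.take (terms - i).toNat), (fibA_for l i terms).2.1, true) := by
  induction l generalizing i with
  | nil => simp [fibA_for]
  | cons v rest ih =>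
    rw [show fibA_for (v :: rest) i terms
          = if i + 1 > terms then ([], i + 1, true)
            else (v :: (fibA_for rest (i + 1) terms).1,
                  (fibA_for rest (i + 1) terms).2.1,
                  (fibA_for rest (i + 1) terms).2.2) from rfl]
    by_cases h : i + 1 > terms
    · rw [if_pos h, if_neg (by rintro (hc | hc) <;> simp at hc; omega)]
      rw [show (terms - i).toNat = 0 by omega, List.take_zero]
    · rw [if_neg h, ih (i + 1)]
      by_cases h2 : (rest.length : Int) ≤ terms - (i + 1) ∨ rest = []
      · have h2' : (rest.length : Int) ≤ terms - (i + 1) := by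
          rcases h2 with h2 | h2
          · exact h2
          · subst h2; simp; omega
        rw [if_pos h2, if_pos (by left; simp only [List.length_cons]; push_cast; omega)]
        simp
        omega
      · push_neg at h2
        rw [if_neg (by push_neg; exact h2), if_neg (by
              push_neg
              exact ⟨by simp only [List.length_cons]; push_cast; omega, by simp⟩)]
        rw [show (terms - i).toNat = (terms - (i + 1)).toNat + 1 by omega]
        simp [List.take_succ_cons]
  termination_by l.length

-- key invariant: B's state (out, s, i) corresponds to A's while-loop state
-- (seq, i) via seq = out.drop (i - n).toNat and s = seq.sum
lemma loop_eq (terms n : Int) (hn : 1 ≤ n) :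
    ∀ (i : Int) (out : List Int), n ≤ i → (out.length : Int) = i →
      fibB_loop out (out.drop (i - n).toNat).sum i terms n
        = out ++ fibA_while (out.drop (i - n).toNat) i terms := by
  intro i out hni hlen
  by_cases h : i + 1 > terms
  · rw [fibB_loop, if_pos (by omega), fibA_while, if_pos h, List.append_nil]
  · rw [fibB_loop, if_neg (by omega), fibA_while, if_neg h]
    set seq := out.drop (i - n).toNat with hseq
    have hseqlen : (seq.length : Int) = n := by simp [hseq]; omega
    obtain ⟨x, rest, hx⟩ : ∃ x rest, seq = x :: rest := by
      cases hs : seq with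
      | nil => exfalso; rw [hs] at hseqlen; simp at hseqlen; omega
      | cons a b => exact ⟨a, b, rfl⟩
    have h1 : out[(i - n).toNat]? = some x := by
      have := congrArg (fun l => l[0]?) hx
      simpa [hseq, List.getElem?_drop] using this
    -- the popped element out[i - n] is the head of the window
    have hget : PySem.List.pyGetD (out ++ [seq.sum]) (i - n) 0 = x := by
      rw [PySem.List.pyGetD_eq_getElem _ 0 (by omega) (by simp; omega)]
      rw [List.getElem_append_left (by omega)]
      obtain ⟨_, hv⟩ := List.getElem?_eq_some_iff.mp h1
      exact hv
    have hdrop2 : (out ++ [seq.sum]).drop ((i + 1) - n).toNat = seq.tail ++ [seq.sum] := by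
      rw [show ((i + 1) - n).toNat = (i - n).toNat + 1 by omega]
      rw [List.drop_append_of_le_length (by omega), ← List.drop_drop, ← hseq]
      simp
    have hsum : seq.sum + (seq.sum - PySem.List.pyGetD (out ++ [seq.sum]) (i - n) 0)
        = ((out ++ [seq.sum]).drop ((i + 1) - n).toNat).sum := by
      rw [hget, hdrop2, hx]; simp; ring
    have ih := loop_eq terms n hn (i + 1) (out ++ [seq.sum]) (by omega) (by simp; omega)
    rw [hsum, ih, hdrop2, hx]
    simp
termination_by i => (terms - i).toNat
decreasing_by omega

-- ===== VERDICT (by name: the statement is the Claim_ definition above) =====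
theorem fibonacci_order_n_spec : Claim_equal_fibonacci_order_n := by
  intro n terms _ hn
  have hn' : (1 : Int) ≤ n := hn
  unfold Spec_fibonacci_order_n fibonacci_order_n fibonacci_order_n_alt
  have hrep := fibA_for_spec (List.replicate n.toNat 1) 0 terms
  by_cases h : terms ≤ n
  · -- terms ≤ n: B's loop exits immediately; A yields min(n, terms) ones
    rw [fibB_loop, if_pos h]
    by_cases h2 : terms = n
    · subst h2
      have hc : ((List.replicate terms.toNat (1 : Int)).length : Int) ≤ terms - 0 ∨
          List.replicate terms.toNat (1 : Int) = [] := by left; simp; omega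
      rw [if_pos hc] at hrep
      have hrep' : fibA_for (List.replicate terms.toNat 1) 0 terms
          = (List.replicate terms.toNat 1, terms, false) := by rw [hrep]; simp; omega
      rw [hrep']
      have hw : fibA_while (List.replicate terms.toNat 1) terms terms = [] := by
        rw [fibA_while, if_pos (show terms + 1 > terms by omega)]
      simp [hw, min_self]
    · have hc : ¬ (((List.replicate n.toNat (1 : Int)).length : Int) ≤ terms - 0 ∨
          List.replicate n.toNat (1 : Int) = []) := by
        push_neg
        exact ⟨by simp; omega, by simp; omega⟩
      rw [if_neg hc] at hrep
      rw [hrep]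
      simp [List.take_replicate]
      congr 1
      omega
  · -- terms > n: both run the main loop from i = n
    push_neg at h
    have hc : ((List.replicate n.toNat (1 : Int)).length : Int) ≤ terms - 0 ∨
        List.replicate n.toNat (1 : Int) = [] := by left; simp; omega
    rw [if_pos hc] at hrep
    have hrep' : fibA_for (List.replicate n.toNat 1) 0 terms
        = (List.replicate n.toNat 1, n, false) := by rw [hrep]; simp; omega
    rw [hrep']
    have hloop := loop_eq terms n hn' n (List.replicate n.toNat 1) le_rfl (by simp; omega)
    rw [show (n - n).toNat = 0 by omega] at hloop
    simp only [List.drop_zero] at hloop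
    rw [show (List.replicate n.toNat (1 : Int)).sum = n by simp; omega] at hloop
    rw [show (min n terms).toNat = n.toNat by omega, hloop]
    simp
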